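-- pv_equiv track=rewrite | github.com/chandan11248/JOB-HUNTING-AGENT | tools/pdf_composer.py | wrap_long_lines
-- ===== SOURCE A (Python) =====
-- def wrap_long_lines(text: str, max_chars: int = 80) -> str:
--     """Manually wrap extremely long words or URLs that fpdf2 might struggle with."""
--     words = text.split(" ")
--     wrapped_words = []
--     for word in words:
--         if len(word) > max_chars:
--             # Split extremely long words (like URLs or complex tech terms)
--             parts = [word[i:i+max_chars] for i in range(0, len(word), max_chars)]
--             wrapped_words.append(" ".join(parts))
--         else:
--             wrapped_words.append(word)
--     return " ".join(wrapped_words)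
-- ===== SOURCE B (Python) =====
-- def wrap_long_lines(text: str, max_chars: int = 80) -> str:
--     """Single left-to-right scan: copy spaces through, chunk each maximal
--     non-space run longer than max_chars; no split/join of the whole text."""
--     out = []
--     i = 0
--     n = len(text)
--     while i < n:
--         if text[i] == " ":
--             out.append(" ")
--             i += 1
--         else:
--             j = i
--             while j < n and text[j] != " ":
--                 j += 1
--             token = text[i:j]
--             if len(token) > max_chars:
--                 token = " ".join(token[k:k+max_chars] for k in range(0, len(token), max_chars))
--             out.append(token)
--             i = j
--     return "".join(out)
-- ===== Notes on version B (the rewrite author's own statement) =====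
-- stated objective: alternative
-- what changed: Replaces A's split-on-space / per-word accumulate / join-with-space pipeline by a single left-to-right scan that copies space characters through unchanged and chunks each maximal non-space run in place.
import Mathlib
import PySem

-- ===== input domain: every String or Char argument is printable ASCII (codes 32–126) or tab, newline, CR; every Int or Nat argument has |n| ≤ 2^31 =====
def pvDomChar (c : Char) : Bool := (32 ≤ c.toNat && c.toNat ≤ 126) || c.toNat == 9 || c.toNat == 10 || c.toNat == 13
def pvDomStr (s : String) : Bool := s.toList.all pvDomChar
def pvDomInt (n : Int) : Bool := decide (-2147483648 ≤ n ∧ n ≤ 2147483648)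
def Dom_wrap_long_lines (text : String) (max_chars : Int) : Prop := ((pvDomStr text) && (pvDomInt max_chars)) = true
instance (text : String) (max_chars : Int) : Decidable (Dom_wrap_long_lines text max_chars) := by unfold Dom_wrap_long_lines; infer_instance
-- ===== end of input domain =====

-- B replaces split(" ")/accumulate/join(" ") with one left-to-right scan that copies spaces
-- through and chunks each maximal non-space run in place (alternative decomposition, same cost).

-- ===== PORT A =====
-- " ".join([word[i:i+max_chars] for i in range(0, len(word), max_chars)])
def pvChunkA (word : List Char) (max_chars : Int) : List Char :=
  PySem.Chars.join [' ']
    ((PySem.List.pyRange 0 (word.length : Int) max_chars).map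
      (fun i => PySem.List.slice word (some i) (some (i + max_chars))))

def wrap_long_lines (text : String) (max_chars : Int) : String :=
  let words := PySem.Chars.splitOn text.toList [' ']
  let wrapped_words := words.foldl
    (fun acc word =>
      if (word.length : Int) > max_chars then acc ++ [pvChunkA word max_chars]
      else acc ++ [word]) []
  String.ofList (PySem.Chars.join [' '] wrapped_words)

-- ===== PORT B =====
-- " ".join(token[k:k+max_chars] for k in range(0, len(token), max_chars))
def pvChunkB (token : List Char) (max_chars : Int) : List Char :=
  PySem.Chars.join [' ']
    ((PySem.List.pyRange 0 (token.length : Int) max_chars).map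
      (fun k => PySem.List.slice token (some k) (some (k + max_chars))))

-- the inner `while j < n and text[j] != " "` scan: the maximal non-space run and the rest
def pvFindToken : List Char → List Char × List Char
  | [] => ([], [])
  | c :: rest =>
    if c = ' ' then ([], c :: rest)
    else
      let tr := pvFindToken rest
      (c :: tr.1, tr.2)

theorem pvFindToken_snd_length (cs : List Char) : (pvFindToken cs).2.length ≤ cs.length := by
  induction cs with
  | nil => simp [pvFindToken]
  | cons c rest ih =>
    simp only [pvFindToken]
    split
    · simp
    · simpa using Nat.le_succ_of_le ih

-- the outer `while i < n` scan of B
def pvAltGo (max_chars : Int) : List Char → List Char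
  | [] => []
  | c :: rest =>
    if c = ' ' then ' ' :: pvAltGo max_chars rest
    else
      let tr := pvFindToken (c :: rest)
      (if ((tr.1).length : Int) > max_chars then pvChunkB tr.1 max_chars else tr.1)
        ++ pvAltGo max_chars tr.2
  termination_by cs => cs.length
  decreasing_by
  · simp
  · simp only [pvFindToken, if_neg (by assumption)]
    exact Nat.lt_succ_of_le (pvFindToken_snd_length rest)

def wrap_long_lines_alt (text : String) (max_chars : Int) : String :=
  String.ofList (pvAltGo max_chars text.toList)

-- ===== PRECONDITION & SPEC =====
-- Pre_ excludes exactly the inputs where Python A raises ValueError (range step 0):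
-- max_chars = 0 together with a non-space character in text; Python B raises there too.
def Pre_wrap_long_lines (text : String) (max_chars : Int) : Prop :=
  max_chars ≠ 0 ∨ ∀ c ∈ text.toList, c = ' '
instance (text : String) (max_chars : Int) : Decidable (Pre_wrap_long_lines text max_chars) := by
  unfold Pre_wrap_long_lines; infer_instance

def pvWitness_wrap_long_lines : String × Int := ("ab cd", 1)

def Spec_wrap_long_lines (text : String) (max_chars : Int) (out : String) : Prop := out = wrap_long_lines_alt text max_chars
instance (text : String) (max_chars : Int) (out : String) : Decidable (Spec_wrap_long_lines text max_chars out) := by unfold Spec_wrap_long_lines; infer_instance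

-- ===== CLAIM (what is proved, stated in full; the proofs are below) =====
def Claim_equal_wrap_long_lines : Prop := ∀ (text : String) (max_chars : Int), Dom_wrap_long_lines text max_chars → Pre_wrap_long_lines text max_chars → Spec_wrap_long_lines text max_chars (wrap_long_lines text max_chars)

-- ===== LEMMAS AND PROOFS =====

-- clean structural version of split(" ") over a char list
def pvSplitSp : List Char → List (List Char)
  | [] => [[]]
  | c :: rest =>
    if c = ' ' then [] :: pvSplitSp rest
    else (pvSplitSp rest).modifyHead (c :: ·)

theorem pvSplitSp_ne_nil (cs : List Char) : pvSplitSp cs ≠ [] := by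
  cases cs with
  | nil => simp [pvSplitSp]
  | cons c rest =>
    simp only [pvSplitSp]
    split
    · simp
    · cases h : pvSplitSp rest with
      | nil => exact absurd h (pvSplitSp_ne_nil rest)
      | cons a t => simp

theorem pvSplitOn_go_spec (fuel : Nat) (l cur : List Char) (acc : List (List Char))
    (h : l.length < fuel) :
    PySem.Chars.splitOn.go [' '] fuel l cur acc
      = acc.reverse ++ (pvSplitSp l).modifyHead (cur.reverse ++ ·) := by
  induction fuel generalizing l cur acc with
  | zero => omega
  | succ fuel ih =>
    cases l with
    | nil =>
      simp [PySem.Chars.splitOn.go, pvSplitSp]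
    | cons c rest =>
      rw [PySem.Chars.splitOn.go]
      by_cases hc : c = ' '
      · have hp : [' '].isPrefixOf (c :: rest) = true := by simp [hc, List.isPrefixOf]
        rw [if_pos hp, show List.drop [' '].length (c :: rest) = rest by simp]
        rw [ih rest [] (cur.reverse :: acc) (by simpa using Nat.lt_of_succ_lt_succ h)]
        cases hs : pvSplitSp rest <;> simp [pvSplitSp, hc, hs]
      · have hp : ¬ ([' '].isPrefixOf (c :: rest) = true) := by
          simp [List.isPrefixOf]; exact fun h' => hc h'.symm
        rw [if_neg hp]
        rw [ih rest (c :: cur) acc (by simpa using Nat.lt_of_succ_lt_succ h)]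
        cases hs : pvSplitSp rest with
        | nil => exact absurd hs (pvSplitSp_ne_nil rest)
        | cons a t =>
          simp [pvSplitSp, hc, hs]

theorem pvSplitOn_eq (cs : List Char) : PySem.Chars.splitOn cs [' '] = pvSplitSp cs := by
  rw [PySem.Chars.splitOn, pvSplitOn_go_spec (cs.length + 1) cs [] [] (Nat.lt_succ_self _)]
  cases h : pvSplitSp cs with
  | nil => exact absurd h (pvSplitSp_ne_nil cs)
  | cons a t => simp

-- what A does to each word
def pvWrapWord (mc : Int) (w : List Char) : List Char :=
  if (w.length : Int) > mc then pvChunkA w mc else w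

theorem pvWrapWord_nil (mc : Int) : pvWrapWord mc [] = [] := by
  unfold pvWrapWord pvChunkA
  split
  · simp [PySem.List.pyRange, PySem.Chars.join, List.intercalate]
  · rfl

theorem pvJoin_singleton (a : List Char) : PySem.Chars.join [' '] [a] = a := by
  simp [PySem.Chars.join, List.intercalate, List.intersperse]

theorem pvJoin_cons (a : List Char) (parts : List (List Char)) (h : parts ≠ []) :
    PySem.Chars.join [' '] (a :: parts) = a ++ ' ' :: PySem.Chars.join [' '] parts := by
  cases parts with
  | nil => exact absurd rfl h
  | cons b t => simp [PySem.Chars.join, List.intercalate, List.intersperse]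

theorem pvFindToken_eq (cs : List Char) :
    pvFindToken cs = (cs.takeWhile (· ≠ ' '), cs.dropWhile (· ≠ ' ')) := by
  induction cs with
  | nil => simp [pvFindToken]
  | cons c rest ih =>
    by_cases hc : c = ' '
    · simp [pvFindToken, hc]
    · simp [pvFindToken, hc, ih]

theorem pvSplitSp_token (t r : List Char) (ht : ∀ x ∈ t, x ≠ ' ') :
    pvSplitSp (t ++ r) = (pvSplitSp r).modifyHead (t ++ ·) := by
  induction t with
  | nil =>
    cases h : pvSplitSp r with
    | nil => exact absurd h (pvSplitSp_ne_nil r)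
    | cons a s => simp [h]
  | cons c t' ih =>
    have hc : c ≠ ' ' := ht c (by simp)
    have ih' := ih (fun x hx => ht x (by simp [hx]))
    cases h : pvSplitSp r with
    | nil => exact absurd h (pvSplitSp_ne_nil r)
    | cons a s =>
      simp only [List.cons_append, pvSplitSp, if_neg hc, ih', h, List.modifyHead]

-- main bridge: A's split/map/join equals B's single scan
theorem pvMain (mc : Int) (cs : List Char) :
    PySem.Chars.join [' '] ((pvSplitSp cs).map (pvWrapWord mc)) = pvAltGo mc cs := by
  induction hn : cs.length using Nat.strong_induction_on generalizing cs with
  | _ n ih =>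
  cases cs with
  | nil =>
    simp [pvSplitSp, pvAltGo, PySem.Chars.join, pvWrapWord_nil, List.intercalate]
  | cons c rest =>
    by_cases hc : c = ' '
    · subst hc
      rw [pvAltGo, if_pos rfl]
      have hs : pvSplitSp (' ' :: rest) = [] :: pvSplitSp rest := rfl
      rw [hs, List.map_cons, pvWrapWord_nil]
      rw [pvJoin_cons [] _ (by simp [pvSplitSp_ne_nil])]
      rw [ih rest.length (by subst hn; simp) rest rfl]
      simp
    · rw [pvAltGo, if_neg hc]
      rw [pvFindToken_eq]
      set t := (c :: rest).takeWhile (· ≠ ' ') with hT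
      set r := (c :: rest).dropWhile (· ≠ ' ') with hR
      have htr : t ++ r = c :: rest := List.takeWhile_append_dropWhile
      have ht : ∀ x ∈ t, x ≠ ' ' := by
        intro x hx
        simpa using List.mem_takeWhile_imp hx
      have hsplit : pvSplitSp (c :: rest) = (pvSplitSp r).modifyHead (t ++ ·) := by
        rw [← htr]; exact pvSplitSp_token t r ht
      have htlen : t.length + r.length = rest.length + 1 := by
        have := congrArg List.length htr; simpa using this
      cases hr : r with
      | nil =>
        rw [hsplit, hr]
        simp only [pvSplitSp, List.modifyHead, List.append_nil, List.map_cons, List.map_nil]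
        rw [pvJoin_singleton]
        simp [pvAltGo, pvWrapWord, pvChunkA, pvChunkB]
      | cons d r' =>
        have hr' : List.dropWhile (fun x => decide (x ≠ ' ')) (c :: rest) = d :: r' := by
          rw [← hR]; exact hr
        have hne : List.dropWhile (fun x => decide (x ≠ ' ')) (c :: rest) ≠ [] := by
          rw [hr']; simp
        have h1 := List.head_dropWhile_not (fun x => decide (x ≠ ' ')) hne
        have h2 : some ((List.dropWhile (fun x => decide (x ≠ ' ')) (c :: rest)).head hne) = some d := by
          rw [← List.head?_eq_some_head, hr']
          rfl
        have hd : d = ' ' := by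
          rw [Option.some.inj h2] at h1; simpa using h1
        subst hd
        have hn' : rest.length + 1 = n := by simpa using hn
        have hrlen : r.length = r'.length + 1 := by rw [hr]; rfl
        have htpos : 0 < t.length := by
          rw [hT, List.takeWhile_cons_of_pos (by simp [hc])]; simp
        rw [hsplit, hr]
        have hs2 : pvSplitSp (' ' :: r') = [] :: pvSplitSp r' := rfl
        rw [hs2]
        simp only [List.modifyHead, List.append_nil, List.map_cons]
        rw [pvJoin_cons _ _ (by simp [pvSplitSp_ne_nil])]
        rw [pvAltGo, if_pos rfl]
        rw [ih r'.length (by omega) r' rfl]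
        simp [pvWrapWord, pvChunkA, pvChunkB]

-- ===== VERDICT (by name: the statement is the Claim_ definition above) =====
theorem wrap_long_lines_spec : Claim_equal_wrap_long_lines := by
  intro text mc _ _
  unfold Spec_wrap_long_lines wrap_long_lines wrap_long_lines_alt
  rw [pvSplitOn_eq]
  have hf : ∀ (acc : List (List Char)) (w : List Char),
      (if (w.length : Int) > mc then acc ++ [pvChunkA w mc] else acc ++ [w])
        = acc ++ [pvWrapWord mc w] := by
    intro acc w
    unfold pvWrapWord
    split <;> rfl
  simp only [hf]
  rw [PySem.List.foldl_append_singleton_eq_map (pvWrapWord mc)]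
  rw [List.nil_append]
  exact congrArg String.ofList (pvMain mc text.toList)
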